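-- pv_equiv track=rewrite | github.com/symaeng98/Algorithm | 프로그래머스/2021_카카오_블라인드_채용/메뉴 리뉴얼.py | solution
-- ===== SOURCE A (Python) =====
-- from itertools import combinations
--
-- def solution(orders, course):
--     menus = {}
--
--     for c in course:
--         for order in orders:
--             for comb in combinations(order, c):
--                 tmp = ''.join(sorted(comb))
--                 if tmp not in menus:
--                     menus[tmp] = 0
--                 menus[tmp] += 1
--
--     sm = sorted(menus.items(), key=lambda x:-x[1])
--     result = []
--     max_cnt = [0]*20
--     for c in course:
--         mc = -1
--         for menu, cnt in sm:
--             if len(menu) != c: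
--                 continue
--             mc = max(mc, cnt)
--         max_cnt[c] = mc
--
--     for c in course:
--         for menu, cnt in sm:
--             if len(menu) != c:
--                 continue
--
--             if 2 <= cnt == max_cnt[c]:
--                 result.append(menu)
--     return sorted(result)
-- ===== SOURCE B (Python) =====
-- from itertools import combinations
-- from collections import Counter
--
-- def solution(orders, course):
--     cnt = Counter(''.join(sorted(comb))
--                   for c in course
--                   for order in orders
--                   for comb in combinations(order, c))
--     bylen = {}
--     for menu, k in cnt.items():
--         bylen.setdefault(len(menu), []).append((menu, k))
--     result = []
--     for c in course:
--         group = bylen.get(c, [])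
--         mc = max((k for _, k in group), default=-1)
--         result += [menu for menu, k in group if k == mc and k >= 2]
--     return sorted(result)
-- ===== Notes on version B (the rewrite author's own statement) =====
-- stated objective: simpler
-- what changed: B counts the same sorted-joined combinations with a Counter, then groups the counted menus by length into a dict once, so each course length is answered by one lookup plus a max over its own group, replacing A's count-sorted list, fixed 20-slot max_cnt array and repeated full rescans of the whole list.
import Mathlib
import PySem

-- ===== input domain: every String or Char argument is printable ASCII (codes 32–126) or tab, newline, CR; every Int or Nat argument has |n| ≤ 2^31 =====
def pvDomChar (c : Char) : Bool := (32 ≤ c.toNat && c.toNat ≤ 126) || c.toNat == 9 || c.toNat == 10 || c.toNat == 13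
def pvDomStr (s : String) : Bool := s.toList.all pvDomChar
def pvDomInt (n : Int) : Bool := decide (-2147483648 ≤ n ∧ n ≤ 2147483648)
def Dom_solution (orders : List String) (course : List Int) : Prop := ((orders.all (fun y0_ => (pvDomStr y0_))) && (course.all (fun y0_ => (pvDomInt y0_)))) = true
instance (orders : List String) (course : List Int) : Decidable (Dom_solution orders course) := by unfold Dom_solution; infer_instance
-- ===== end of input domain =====

-- B replaces A's count-sorted list, fixed 20-slot array and repeated rescans of that whole list by a
-- length-keyed index over the counter, dropping the sort and the array; objective: simpler, not faster.

-- ===== PORT A =====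
-- ''.join(sorted(comb)) (shared by both ports)
def pvSJoin (comb : List Char) : String := String.ofList (PySem.List.sorted comb (fun x => x) false)

-- first loop nest: menus counting ('c.toNat' is safe: Pre_ gives 0 ≤ c whenever orders ≠ [])
def pvAMenus (orders : List String) (course : List Int) : PySem.Dict String Int :=
  course.foldl (fun m c =>
    orders.foldl (fun m order =>
      (PySem.List.combinations order.toList c.toNat).foldl (fun m comb =>
        let tmp := pvSJoin comb
        let m' := if m.contains tmp then m else m.insert tmp 0   -- if tmp not in menus: menus[tmp] = 0
        m'.insert tmp (m'.getD tmp 0 + 1)) m) m)                 -- menus[tmp] += 1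
    PySem.Dict.empty

-- sm = sorted(menus.items(), key=lambda x: -x[1])
def pvASm (orders : List String) (course : List Int) : List (String × Int) :=
  PySem.List.sorted (pvAMenus orders course).items (fun x => -x.2) false

-- body of the second loop: mc = -1; for menu, cnt in sm: ... mc = max(mc, cnt)
def pvAMc (sm : List (String × Int)) (c : Int) : Int :=
  sm.foldl (fun mc p => if PySem.Str.len p.1 ≠ c then mc else max mc p.2) (-1)

-- max_cnt = [0]*20 then max_cnt[c] = mc; the index may be negative (Python wraps); Pre_ keeps it in [-20, 20)
def pvAMaxCnt (orders : List String) (course : List Int) : List Int :=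
  course.foldl (fun mcl c => mcl.set (if c < 0 then c + 20 else c).toNat (pvAMc (pvASm orders course) c))
    (List.replicate 20 (0 : Int))

def solution (orders : List String) (course : List Int) : List String :=
  let sm := pvASm orders course
  let maxCnt := pvAMaxCnt orders course
  let result : List String :=
    course.foldl (fun res c =>
      sm.foldl (fun res p =>
        if PySem.Str.len p.1 ≠ c then res
        else if 2 ≤ p.2 ∧ p.2 = PySem.List.pyGetD maxCnt c 0 then res ++ [p.1]
        else res) res) ([] : List String)
  PySem.List.sorted result (fun x => x) false

-- ===== PORT B =====
-- the generator expression fed to Counter(...)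
def pvStream (orders : List String) (course : List Int) : List String :=
  course.flatMap (fun c =>
    orders.flatMap (fun order =>
      (PySem.List.combinations order.toList c.toNat).map pvSJoin))

-- bylen: length -> list of (menu, count), via setdefault(len(menu), []).append((menu, k))
def pvBGroups (items : List (String × Int)) : PySem.Dict Int (List (String × Int)) :=
  items.foldl (fun d p => d.modify (PySem.Str.len p.1) [] (fun g => g ++ [p])) PySem.Dict.empty

def solution_alt (orders : List String) (course : List Int) : List String :=
  let cnt := PySem.Dict.counter (pvStream orders course)
  let bylen := pvBGroups cnt.items
  let result : List String :=
    course.foldl (fun res c =>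
      let group := bylen.getD c []
      let mc := PySem.List.maxD (group.map (fun p => p.2)) (fun x => x) (-1)
      res ++ group.filterMap (fun p => if p.2 = mc ∧ 2 ≤ p.2 then some p.1 else none)) ([] : List String)
  PySem.List.sorted result (fun x => x) false

-- ===== PRECONDITION & SPEC =====
-- A raises on every input outside Pre_: ValueError from combinations(order, c) for a negative c when
-- orders is nonempty, IndexError from max_cnt[c] for c ≥ 20 or c < -20 (with orders = [] a negative
-- c only wraps around in max_cnt, so there A returns normally down to c = -20).
def Pre_solution (orders : List String) (course : List Int) : Prop :=
  (∀ c ∈ course, 0 ≤ c ∧ c < 20) ∨ (orders = [] ∧ ∀ c ∈ course, -20 ≤ c ∧ c < 20)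
instance (orders : List String) (course : List Int) : Decidable (Pre_solution orders course) := by
  unfold Pre_solution; infer_instance
def pvWitness_solution : List String × List Int := (["abcd", "ab", "bc"], [2, 3])

def Spec_solution (orders : List String) (course : List Int) (out : List String) : Prop := out = solution_alt orders course
instance (orders : List String) (course : List Int) (out : List String) : Decidable (Spec_solution orders course out) := by unfold Spec_solution; infer_instance

-- ===== CLAIM (what is proved, stated in full; the proofs are below) =====
def Claim_equal_solution : Prop := ∀ (orders : List String) (course : List Int), Dom_solution orders course → Pre_solution orders course → Spec_solution orders course (solution orders course)

-- ===== LEMMAS AND PROOFS =====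

-- A's "ensure key then += 1" step is exactly Counter's modify step
lemma pv_step_eq (m : PySem.Dict String Int) (x : String) :
    (if m.contains x then m else m.insert x 0).insert x
      ((if m.contains x then m else m.insert x 0).getD x 0 + 1) = m.modify x 0 (fun v => v + 1) := by
  by_cases h : m.contains x
  · simp [h, PySem.Dict.modify]
  · rw [if_neg (by simp [h]), PySem.Dict.insert_insert_self, PySem.Dict.getD_insert_self,
      PySem.Dict.modify, PySem.Dict.getD_of_not_contains _ _ (by simp [h])]

-- A's counting loop builds Counter(pvStream orders course)
lemma pvAMenus_eq (orders : List String) (course : List Int) :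
    pvAMenus orders course = PySem.Dict.counter (pvStream orders course) := by
  simp only [pvAMenus, pvStream, PySem.Dict.counter_eq_foldl, List.foldl_flatMap, List.foldl_map]
  simp only [pv_step_eq]

lemma pvASm_eq (orders : List String) (course : List Int) :
    pvASm orders course =
      PySem.List.sorted (PySem.Dict.counter (pvStream orders course)).items (fun x => -x.2) false := by
  simp only [pvASm, pvAMenus_eq]

-- B's length-keyed index holds exactly the counter items of each length, in counter order
lemma pvBGroups_getD (items : List (String × Int)) (c : Int) :
    (pvBGroups items).getD c [] = items.filter (fun p => PySem.Str.len p.1 == c) := by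
  unfold pvBGroups
  have h := List.foldl_map (f := fun p : String × Int => (PySem.Str.len p.1, p))
    (g := fun (d : PySem.Dict Int (List (String × Int))) q => d.modify q.1 [] (fun g => g ++ [q.2]))
    (l := items) (init := PySem.Dict.empty)
  simp only at h
  rw [← h, PySem.Dict.getD_foldl_modify_append, PySem.Dict.getD_empty, List.nil_append,
    List.filter_map, List.map_map]
  simp [Function.comp_def]

lemma pv_foldl_max_perm : ∀ {xs ys : List Int}, xs.Perm ys → ∀ a : Int, xs.foldl max a = ys.foldl max a := by
  intro xs ys h
  induction h with
  | nil => intro a; rfl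
  | cons x _ ih => intro a; simp only [List.foldl_cons]; exact ih _
  | swap x y l => intro a; simp only [List.foldl_cons]; rw [max_right_comm]
  | trans _ _ ih1 ih2 => intro a; rw [ih1, ih2]

-- [x for x in l if p x] as filterMap
lemma pv_filterMap_if {α β : Type} (p : α → Prop) [DecidablePred p] (f : α → β) :
    ∀ l : List α, l.filterMap (fun x => if p x then some (f x) else none)
      = (l.filter (fun x => decide (p x))).map f := by
  intro l
  induction l with
  | nil => rfl
  | cons a t ih => by_cases h : p a <;> simp [h, ih]

-- every count in a Counter is at least 1
lemma pv_count_ge_one (xs : List String) (p : String × Int)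
    (hp : p ∈ (PySem.Dict.counter xs).items) : 1 ≤ p.2 := by
  rw [PySem.Dict.items_counter] at hp
  obtain ⟨k, hk, rfl⟩ := List.mem_map.mp hp
  have hm : k ∈ xs := (PySem.Set.mem_ofList xs k).mp hk
  have h := List.count_pos_iff.mpr hm
  show (1 : Int) ≤ ((List.count k xs : Nat) : Int)
  exact_mod_cast h

-- A's running max over sm, restricted to length c, is B's max over the length-c group (default -1)
lemma pv_mc_eq (orders : List String) (course : List Int) (c : Int) :
    pvAMc (pvASm orders course) c
      = PySem.List.maxD
          (((PySem.Dict.counter (pvStream orders course)).items.filter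
              (fun p => PySem.Str.len p.1 == c)).map (fun p => p.2)) (fun x => x) (-1) := by
  rw [pvASm_eq]
  set I := (PySem.Dict.counter (pvStream orders course)).items with hI
  unfold pvAMc
  have hb : (fun (mc : Int) (p : String × Int) => if PySem.Str.len p.1 ≠ c then mc else max mc p.2)
      = (fun mc p => if (PySem.Str.len p.1 == c) = true then max mc p.2 else mc) := by
    funext mc p; by_cases h : PySem.Str.len p.1 = c <;> simp [h]
  rw [hb, ← List.foldl_filter]
  have h2 := List.foldl_map (f := fun p : String × Int => p.2) (g := fun (a b : Int) => max a b)
    (l := (PySem.List.sorted I (fun x => -x.2) false).filter (fun p => PySem.Str.len p.1 == c))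
    (init := (-1 : Int))
  simp only at h2
  rw [← h2]
  have hperm : (((PySem.List.sorted I (fun x => -x.2) false).filter
        (fun p => PySem.Str.len p.1 == c)).map (fun p : String × Int => p.2)).Perm
      ((I.filter (fun p => PySem.Str.len p.1 == c)).map (fun p : String × Int => p.2)) :=
    ((PySem.List.sorted_perm I _ false).filter _).map _
  rw [pv_foldl_max_perm hperm]
  cases hys : (I.filter (fun p => PySem.Str.len p.1 == c)).map (fun p : String × Int => p.2) with
  | nil =>
      have : PySem.List.max? ([] : List Int) (fun y => y) = none :=
        (PySem.List.max?_eq_none_iff _ _).mpr rfl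
      simp [PySem.List.maxD, this]
  | cons b t =>
      have hb1 : 1 ≤ b := by
        have hbmem : b ∈ (I.filter (fun p => PySem.Str.len p.1 == c)).map
            (fun p : String × Int => p.2) := by rw [hys]; exact List.mem_cons_self
        obtain ⟨q, hq, rfl⟩ := List.mem_map.mp hbmem
        exact pv_count_ge_one _ q (List.mem_of_mem_filter hq)
      rw [PySem.List.maxD, PySem.List.max?_id_cons]
      simp only [Option.getD_some, List.foldl_cons]
      rw [max_eq_right (by omega)]

-- folds of .set: untouched cells are preserved, and for injective indices
-- the cell of a visited c0 holds g c0
lemma pv_set_fold_ne (g : Int → Int) (idx : Int → Nat) :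
    ∀ (l : List Int) (a : List Int) (n : Nat), (∀ c ∈ l, idx c ≠ n) →
      (l.foldl (fun a c => a.set (idx c) (g c)) a)[n]? = a[n]? := by
  intro l
  induction l with
  | nil => intro a n _; rfl
  | cons c t ih =>
      intro a n h
      simp only [List.foldl_cons]
      rw [ih _ _ (fun c' hc' => h c' (List.mem_cons_of_mem _ hc')), List.getElem?_set,
        if_neg (h c List.mem_cons_self)]

lemma pv_set_fold_get (g : Int → Int) (idx : Int → Nat) :
    ∀ (l : List Int) (a : List Int) (c0 : Int), c0 ∈ l → (∀ c ∈ l, idx c = idx c0 → c = c0) →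
      idx c0 < a.length → (l.foldl (fun a c => a.set (idx c) (g c)) a)[idx c0]? = some (g c0) := by
  intro l
  induction l with
  | nil => intro a c0 h; exact absurd h (List.not_mem_nil)
  | cons c t ih =>
      intro a c0 hmem hinj hlen
      simp only [List.foldl_cons]
      by_cases hm : c0 ∈ t
      · exact ih _ c0 hm (fun c' hc' => hinj c' (List.mem_cons_of_mem _ hc'))
          (by rw [List.length_set]; exact hlen)
      · have hc : c0 = c := by
          rcases List.mem_cons.mp hmem with h | h
          · exact h
          · exact absurd h hm
        subst hc
        rw [pv_set_fold_ne g idx t _ _ ?hne, List.getElem?_set, if_pos rfl, if_pos hlen]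
        case hne =>
          intro c' hc' he
          exact hm ((hinj c' (List.mem_cons_of_mem _ hc') he) ▸ hc')

-- reading max_cnt[c0] after the second loop gives A's mc for c0 (all course values in [0, 20))
lemma pv_maxcnt (orders : List String) (course : List Int)
    (h1 : ∀ c ∈ course, 0 ≤ c ∧ c < 20) (c0 : Int) (hc0 : c0 ∈ course) :
    PySem.List.pyGetD (pvAMaxCnt orders course) c0 0 = pvAMc (pvASm orders course) c0 := by
  have h0 := h1 c0 hc0
  unfold pvAMaxCnt
  rw [PySem.List.pyGetD_of_nonneg _ _ h0.1, List.getD_eq_getElem?_getD]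
  have hidx : ∀ c ∈ course,
      (fun c => (if c < 0 then c + 20 else c).toNat) c = (fun c => (if c < 0 then c + 20 else c).toNat) c0
        → c = c0 := by
    intro c hc he
    have hcb := h1 c hc
    simp only [if_neg (by omega : ¬ c < 0), if_neg (by omega : ¬ c0 < 0)] at he
    omega
  have hget := pv_set_fold_get (fun c => pvAMc (pvASm orders course) c)
    (fun c => (if c < 0 then c + 20 else c).toNat) course (List.replicate 20 0) c0 hc0 hidx
    (by simp only [List.length_replicate]; rw [if_neg (by omega : ¬ c0 < 0)]; omega)
  simp only [if_neg (by omega : ¬ c0 < 0)] at hget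
  rw [hget]
  rfl

-- the two branches of Pre_
lemma pv_main (orders : List String) (course : List Int)
    (h1 : ∀ c ∈ course, 0 ≤ c ∧ c < 20) : solution orders course = solution_alt orders course := by
  simp only [solution, solution_alt]
  have hbodyA : ∀ c : Int,
      (fun (res : List String) (p : String × Int) =>
        if PySem.Str.len p.1 ≠ c then res
        else if 2 ≤ p.2 ∧ p.2 = PySem.List.pyGetD (pvAMaxCnt orders course) c 0 then res ++ [p.1]
        else res)
      = (fun res p =>
        if ((PySem.Str.len p.1 == c) &&
            decide (2 ≤ p.2 ∧ p.2 = PySem.List.pyGetD (pvAMaxCnt orders course) c 0)) = true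
        then res ++ [p.1] else res) := by
    intro c; funext res p
    by_cases hL : PySem.Str.len p.1 = c <;>
      by_cases hC : 2 ≤ p.2 ∧ p.2 = PySem.List.pyGetD (pvAMaxCnt orders course) c 0 <;>
      simp [hL, hC, ite_and]
  simp only [hbodyA, PySem.List.foldl_append_if, PySem.List.foldl_append_eq_flatMap,
    List.nil_append]
  refine (PySem.List.sorted_id_eq_sorted_id_iff_perm _ _).mpr ?_
  refine (List.Perm.refl course).flatMap ?_
  intro c hc
  rw [pvBGroups_getD, pv_filterMap_if, List.filter_filter,
    pv_maxcnt orders course h1 c hc, pv_mc_eq, pvASm_eq]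
  set K := PySem.List.maxD
      (((PySem.Dict.counter (pvStream orders course)).items.filter
          (fun p => PySem.Str.len p.1 == c)).map (fun p => p.2)) (fun x => x) (-1) with hK
  have hpred : ∀ p : String × Int,
      ((PySem.Str.len p.1 == c) && decide (2 ≤ p.2 ∧ p.2 = K))
        = (decide (p.2 = K ∧ 2 ≤ p.2) && (PySem.Str.len p.1 == c)) := by
    intro p
    by_cases hL : PySem.Str.len p.1 = c <;> by_cases hX : p.2 = K <;> by_cases hY : 2 ≤ p.2 <;>
      simp [hL, hX, hY, Bool.and_comm]
  rw [List.filter_congr (fun p _ => hpred p)]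
  exact ((PySem.List.sorted_perm _ _ false).filter _).map _

lemma pv_empty (course : List Int) : solution [] course = solution_alt [] course := by
  have hmenus : pvAMenus [] course = PySem.Dict.empty := by
    simp [pvAMenus, List.foldl_fixed]
  have hsm : pvASm [] course = [] := by
    rw [pvASm, hmenus]
    have hit : (PySem.Dict.empty : PySem.Dict String Int).items = [] := rfl
    rw [hit]
    exact (PySem.List.sorted_eq_nil_iff _ _ _).mpr rfl
  have hstream : pvStream [] course = [] := by
    simp [pvStream]
  have hcnt : PySem.Dict.counter ([] : List String) = PySem.Dict.empty := rfl
  have hgrp : pvBGroups (PySem.Dict.empty : PySem.Dict String Int).items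
      = (PySem.Dict.empty : PySem.Dict Int (List (String × Int))) := rfl
  simp [solution, solution_alt, hsm, hstream, hcnt, hgrp, PySem.Dict.getD_empty,
    List.foldl_fixed]

-- ===== VERDICT (by name: the statement is the Claim_ definition above) =====
theorem solution_spec : Claim_equal_solution := by
  intro orders course _ hpre
  unfold Spec_solution
  rcases hpre with h1 | ⟨horders, _⟩
  · exact pv_main orders course h1
  · subst horders; exact pv_empty course
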